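-- pv_equiv track=rewrite | github.com/SosaRaul/Excercises_Python_UNSAM | Correción por pares/Ej4.6/codigo1.py | propagar
-- ===== SOURCE A (Python) =====
-- def invertir_lista(lista):
--     largo_lista = len(lista)
--     invertida = [None]*largo_lista
--     for posicion, valor in enumerate(lista): # Recorro la lista
--         #agrego el elemento e al principio de la lista invertida
--         indice = largo_lista - posicion - 1
--         invertida[indice] = valor
--     return invertida
--
-- def propagar(lista):
--     lista_propagada = lista.copy()
--     longitud_lista = len(lista_propagada)-1
--     for indice, estado_fosforo in zip(range(longitud_lista), lista_propagada):
--         if estado_fosforo == 1 and lista_propagada[indice+1] != -1: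
--             lista_propagada[indice+1] = 1
--     lista_propagada = invertir_lista(lista_propagada)
--
--     # for indice, estado_fosforo in zip(range(longitud_lista), lista_propagada):
--     #     if estado_fosforo == 1 and lista_propagada[indice+1] != -1:
--     #         lista_propagada[indice+1] = 1
--     # lista_propagada = invertir_lista(lista_propagada)
--     return lista_propagada
-- ===== SOURCE B (Python) =====
-- def propagar(lista):
--     # One fused pass: propagate the 1-carry left to right and write each value
--     # directly into its final (reversed) slot of a preallocated output list.
--     n = len(lista)
--     out = [0] * n
--     active = False
--     for j, x in enumerate(lista):
--         val = 1 if (active and x != -1) else x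
--         active = (val == 1)
--         out[n - 1 - j] = val
--     return out
-- ===== Notes on version B (the rewrite author's own statement) =====
-- stated objective: alternative
-- what changed: A mutates a copy to propagate 1s forward and then reverses it in a second pass; B fuses both passes into one loop carrying a boolean 'active' flag and writing each propagated value directly into its final reversed position of a preallocated output list.
import Mathlib
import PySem

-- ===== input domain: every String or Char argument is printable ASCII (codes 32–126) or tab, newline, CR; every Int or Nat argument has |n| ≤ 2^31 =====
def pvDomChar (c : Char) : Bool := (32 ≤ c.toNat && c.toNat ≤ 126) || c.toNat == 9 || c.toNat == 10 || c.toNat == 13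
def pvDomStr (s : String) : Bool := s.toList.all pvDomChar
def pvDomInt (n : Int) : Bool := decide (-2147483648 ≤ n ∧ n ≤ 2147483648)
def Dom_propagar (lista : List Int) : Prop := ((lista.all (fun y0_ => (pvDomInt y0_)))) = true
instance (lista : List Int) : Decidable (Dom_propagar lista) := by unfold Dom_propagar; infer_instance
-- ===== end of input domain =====

-- B fuses A's propagate-then-reverse into one pass with a carry flag writing into reversed positions; proved equal on all inputs.


-- ===== PORT A =====
-- invertir_lista: [None]*n is modeled as a placeholder list of 0s — every slot is overwritten
-- (the loop writes each of the n positions exactly once), so the placeholder never survives.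
def invertirLista (lista : List Int) : List Int :=
  let largo : Int := lista.length
  (PySem.List.enumerate lista).foldl
    (fun invertida pv => PySem.List.pySetD invertida (largo - pv.1 - 1) pv.2)
    (List.replicate lista.length 0)

-- zip(range(len-1), lista_propagada): the list iterator reads the CURRENT (already mutated)
-- element, so estado_fosforo at index i is lista_propagada[i] after earlier iterations.
def propagar (lista : List Int) : List Int :=
  let listaPropagada := lista   -- lista.copy()
  let longitudLista : Int := (lista.length : Int) - 1
  let listaPropagada :=
    (PySem.List.pyRange 0 longitudLista 1).foldl
      (fun lp indice =>
        if PySem.List.pyGetD lp indice 0 = 1 ∧ PySem.List.pyGetD lp (indice + 1) 0 ≠ -1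
        then PySem.List.pySetD lp (indice + 1) 1
        else lp)
      listaPropagada
  invertirLista listaPropagada

-- ===== PORT B =====
def propagar_alt (lista : List Int) : List Int :=
  let n : Int := lista.length
  (((PySem.List.enumerate lista).foldl
      (fun (st : List Int × Bool) jx =>
        let val : Int := if st.2 ∧ jx.2 ≠ -1 then 1 else jx.2
        (PySem.List.pySetD st.1 (n - 1 - jx.1) val, val == 1))
      (List.replicate lista.length 0, false))).1

-- ===== PRECONDITION & SPEC =====
def Spec_propagar (lista : List Int) (out : List Int) : Prop := out = propagar_alt lista
instance (lista : List Int) (out : List Int) : Decidable (Spec_propagar lista out) := by unfold Spec_propagar; infer_instance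

-- ===== CLAIM (what is proved, stated in full; the proofs are below) =====
def Claim_equal_propagar : Prop := ∀ (lista : List Int), Dom_propagar lista → Spec_propagar lista (propagar lista)

-- ===== LEMMAS AND PROOFS =====

-- the propagated value of one element given the carry
def pv (a : Bool) (x : Int) : Int := if a ∧ x ≠ -1 then 1 else x

-- the forward-propagated list (index 0 untouched when the initial carry is false)
def prop (a : Bool) : List Int → List Int
  | [] => []
  | x :: xs => pv a x :: prop (pv a x == 1) xs

theorem prop_length (a : Bool) (l : List Int) : (prop a l).length = l.length := by
  induction l generalizing a with
  | nil => rfl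
  | cons x xs ih => simp [prop, ih]

theorem drop_set_self (xs : List Int) (k : Nat) (x : Int) (h : k < xs.length) :
    (xs.set k x).drop k = x :: xs.drop (k + 1) := by
  induction xs generalizing k with
  | nil => simp at h
  | cons y ys ih =>
    cases k with
    | zero => simp
    | succ k => simpa using ih k (by simpa using h)

theorem scatter (n : Nat) (l : List Int) : ∀ (s : Nat) (init : List Int),
    init.length = n → s + l.length = n →
    (PySem.List.enumerate l (s : Int)).foldl
      (fun acc p => PySem.List.pySetD acc ((n : Int) - 1 - p.1) p.2) init
      = l.reverse ++ init.drop (n - s) := by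
  induction l with
  | nil =>
    intro s init h1 h2
    simp only [List.length_nil, Nat.add_zero] at h2
    simp [PySem.List.enumerate_nil, h2]
  | cons x xs ih =>
    intro s init h1 h2
    simp only [List.length_cons] at h2
    have hs : s < n := by omega
    rw [PySem.List.enumerate_cons, List.foldl_cons]
    have hset : PySem.List.pySetD init ((n : Int) - 1 - (s : Int)) x
        = init.set (n - 1 - s) x := by
      rw [PySem.List.pySetD_of_nonneg init x (by omega)]
      congr 1
      omega
    have hcast : ((s : Int) + 1) = ((s + 1 : Nat) : Int) := by push_cast; ring
    rw [hset, hcast, ih (s + 1) (init.set (n - 1 - s) x) (by simp [h1]) (by omega)]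
    have hd : n - (s + 1) = n - 1 - s := by omega
    rw [hd, drop_set_self init (n - 1 - s) x (by omega)]
    have hd2 : n - 1 - s + 1 = n - s := by omega
    rw [hd2]
    simp

theorem prop_getD_succ (l : List Int) : ∀ (a : Bool) (k : Nat), k + 1 < l.length →
    (prop a l).getD (k + 1) 0 =
      if (prop a l).getD k 0 = 1 ∧ l.getD (k + 1) 0 ≠ -1 then 1 else l.getD (k + 1) 0 := by
  induction l with
  | nil => intro a k h; simp at h
  | cons x xs ih =>
    intro a k h
    cases k with
    | zero =>
      cases xs with
      | nil => simp at h
      | cons y ys => simp [prop, pv]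
    | succ k =>
      simp only [List.length_cons] at h
      simpa [prop] using ih (pv a x == 1) k (by omega)

theorem loopA_aux (l : List Int) (k : Nat) (hk : k < l.length) :
    (PySem.List.pyRange (k : Int) ((l.length : Int) - 1) 1).foldl
      (fun lp indice =>
        if PySem.List.pyGetD lp indice 0 = 1 ∧ PySem.List.pyGetD lp (indice + 1) 0 ≠ -1
        then PySem.List.pySetD lp (indice + 1) 1
        else lp)
      ((prop false l).take (k + 1) ++ l.drop (k + 1))
      = prop false l := by
  have hlen : (prop false l).length = l.length := prop_length _ _
  by_cases hk1 : k + 1 < l.length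
  · have hlt : (k : Int) < (l.length : Int) - 1 := by omega
    rw [PySem.List.pyRange_one_cons hlt, List.foldl_cons]
    have ht : ((prop false l).take (k + 1)).length = k + 1 := by
      simp [hlen]; omega
    have hg1 : PySem.List.pyGetD ((prop false l).take (k + 1) ++ l.drop (k + 1)) (k : Int) 0
        = (prop false l).getD k 0 := by
      rw [PySem.List.pyGetD_natCast, List.getD_eq_getElem?_getD, List.getD_eq_getElem?_getD,
        List.getElem?_append_left (by omega), List.getElem?_take_of_lt (by omega)]
    have hg2 : PySem.List.pyGetD ((prop false l).take (k + 1) ++ l.drop (k + 1)) ((k : Int) + 1) 0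
        = l.getD (k + 1) 0 := by
      have hc : ((k : Int) + 1) = ((k + 1 : Nat) : Int) := by push_cast; ring
      rw [hc, PySem.List.pyGetD_natCast, List.getD_eq_getElem?_getD, List.getD_eq_getElem?_getD,
        List.getElem?_append_right (by omega), ht]
      simp [List.getElem?_drop]
    have hdrop : l.drop (k + 1) = l.getD (k + 1) 0 :: l.drop (k + 2) := by
      rw [List.getD_eq_getElem?_getD, List.getElem?_eq_getElem hk1]
      exact List.drop_eq_getElem_cons hk1
    have htake : (prop false l).take (k + 2)
        = (prop false l).take (k + 1) ++ [(prop false l).getD (k + 1) 0] := by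
      rw [List.take_add_one, List.getD_eq_getElem?_getD,
        List.getElem?_eq_getElem (by omega : k + 1 < (prop false l).length)]
      rfl
    have hrec := prop_getD_succ l false k hk1
    have hstep : (if PySem.List.pyGetD ((prop false l).take (k + 1) ++ l.drop (k + 1)) (k : Int) 0 = 1 ∧
          PySem.List.pyGetD ((prop false l).take (k + 1) ++ l.drop (k + 1)) ((k : Int) + 1) 0 ≠ -1
        then PySem.List.pySetD ((prop false l).take (k + 1) ++ l.drop (k + 1)) ((k : Int) + 1) 1
        else (prop false l).take (k + 1) ++ l.drop (k + 1))
        = (prop false l).take (k + 2) ++ l.drop (k + 2) := by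
      rw [hg1, hg2, htake]
      by_cases hC : (prop false l).getD k 0 = 1 ∧ l.getD (k + 1) 0 ≠ -1
      · rw [if_pos hC]
        have hc : ((k : Int) + 1) = ((k + 1 : Nat) : Int) := by push_cast; ring
        rw [hc, PySem.List.pySetD_natCast, hdrop, List.set_append]
        rw [if_neg (by omega)]
        rw [ht, hrec, if_pos hC]
        simp
      · rw [if_neg hC, hrec, if_neg hC, hdrop]
        simp
    rw [hstep]
    have hc : ((k : Int) + 1) = ((k + 1 : Nat) : Int) := by push_cast; ring
    rw [hc]
    exact loopA_aux l (k + 1) (by omega)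
  · have hke : k + 1 = l.length := by omega
    have hr : PySem.List.pyRange (k : Int) ((l.length : Int) - 1) 1 = [] := by
      apply PySem.List.pyRange_one_eq_nil
      omega
    rw [hr, List.foldl_nil, hke, List.drop_length, List.append_nil,
      List.take_of_length_le (by omega)]
termination_by l.length - k
decreasing_by omega

theorem invertirLista_eq_reverse (l : List Int) : invertirLista l = l.reverse := by
  unfold invertirLista
  have h := scatter l.length l 0 (List.replicate l.length 0) (by simp) (by simp)
  simp only [Nat.cast_zero, Nat.sub_zero] at h
  simp only [show ∀ (p : Int × Int) (acc : List Int),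
      PySem.List.pySetD acc ((l.length : Int) - p.1 - 1) p.2
        = PySem.List.pySetD acc ((l.length : Int) - 1 - p.1) p.2 from
      fun p acc => by ring_nf]
  rw [h]
  simp

theorem propagar_eq_rev (lista : List Int) : propagar lista = (prop false lista).reverse := by
  dsimp only [propagar]
  cases lista with
  | nil => simp [PySem.List.pyRange, invertirLista, PySem.List.enumerate_nil, prop]
  | cons x xs =>
    have h0 := loopA_aux (x :: xs) 0 (by simp)
    simp only [Nat.cast_zero] at h0
    have hacc : (prop false (x :: xs)).take 1 ++ (x :: xs).drop 1 = x :: xs := by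
      simp [prop, pv]
    rw [hacc] at h0
    rw [h0, invertirLista_eq_reverse]

theorem loopB (n : Int) (l : List Int) : ∀ (s : Int) (a : Bool) (out : List Int),
    ((PySem.List.enumerate l s).foldl
      (fun (st : List Int × Bool) jx =>
        let val : Int := if st.2 ∧ jx.2 ≠ -1 then 1 else jx.2
        (PySem.List.pySetD st.1 (n - 1 - jx.1) val, val == 1)) (out, a)).1
    = (PySem.List.enumerate (prop a l) s).foldl
        (fun acc p => PySem.List.pySetD acc (n - 1 - p.1) p.2) out := by
  induction l with
  | nil => intro s a out; simp [prop, PySem.List.enumerate_nil]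
  | cons x xs ih =>
    intro s a out
    rw [PySem.List.enumerate_cons, List.foldl_cons]
    simp only [prop, PySem.List.enumerate_cons, List.foldl_cons]
    exact ih (s + 1) (pv a x == 1) (PySem.List.pySetD out (n - 1 - s) (pv a x))

theorem propagar_alt_eq_rev (lista : List Int) : propagar_alt lista = (prop false lista).reverse := by
  dsimp only [propagar_alt]
  rw [loopB (lista.length : Int) lista 0 false (List.replicate lista.length 0)]
  have h := scatter lista.length (prop false lista) 0 (List.replicate lista.length 0)
    (by simp) (by simp [prop_length])
  simp only [Nat.cast_zero, Nat.sub_zero] at h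
  rw [h]
  simp

-- ===== VERDICT (by name: the statement is the Claim_ definition above) =====
theorem propagar_spec : Claim_equal_propagar := by
  intro lista _
  unfold Spec_propagar
  rw [propagar_eq_rev, propagar_alt_eq_rev]
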